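-- pv_equiv track=rewrite | github.com/Junimpsj/calculadora_IPV6_redes_I | calculator.py | encontrar_sequencia_zeros_leftmost
-- ===== SOURCE A (Python) =====
-- def encontrar_sequencia_zeros_leftmost(grupos):
--     """
--     No leftmost quando há empate, escolhe a sequência mais à esquerda.
--     """
--     max_inicio = -1
--     max_tamanho = 0
--
--     #Procura todas as sequências de zeros
--     i = 0
--     while i < len(grupos):
--         if grupos[i] == '0':
--             inicio = i
--             tamanho = 0
--             while i < len(grupos) and grupos[i] == '0':
--                 tamanho += 1
--                 i += 1
--
--             if tamanho > max_tamanho and tamanho >= 2: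
--                 max_inicio = inicio
--                 max_tamanho = tamanho
--         else:
--             i += 1
--
--     return max_inicio, max_tamanho
-- ===== SOURCE B (Python) =====
-- def encontrar_sequencia_zeros_leftmost(grupos):
--     # Run-length encode the list once, then scan the runs, threading a start index.
--     runs = []
--     for g in grupos:
--         if runs and runs[-1][0] == g:
--             runs[-1] = (g, runs[-1][1] + 1)
--         else:
--             runs.append((g, 1))
--     best = (-1, 0)
--     idx = 0
--     for k, l in runs:
--         if k == '0' and l >= 2 and l > best[1]:
--             best = (idx, l)
--         idx += l
--     return best
-- ===== Notes on version B (the rewrite author's own statement) =====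
-- stated objective: alternative
-- what changed: Replaces A's index-driven while loop with nested zero-counting by a two-phase pass: run-length encode the list once, then scan the runs threading a running start index.
import Mathlib
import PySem

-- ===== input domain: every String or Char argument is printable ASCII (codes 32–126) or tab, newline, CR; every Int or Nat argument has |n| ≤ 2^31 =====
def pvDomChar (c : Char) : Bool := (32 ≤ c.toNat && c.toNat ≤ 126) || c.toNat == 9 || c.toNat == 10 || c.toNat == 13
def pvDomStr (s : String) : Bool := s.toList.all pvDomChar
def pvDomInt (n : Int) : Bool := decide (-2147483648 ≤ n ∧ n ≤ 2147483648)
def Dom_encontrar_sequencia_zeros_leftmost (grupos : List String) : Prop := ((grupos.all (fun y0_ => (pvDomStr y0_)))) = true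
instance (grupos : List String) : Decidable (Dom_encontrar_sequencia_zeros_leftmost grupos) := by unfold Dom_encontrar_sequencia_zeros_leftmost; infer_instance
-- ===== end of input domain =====

-- B re-implements A as a two-phase pass (run-length encode the list, then scan the runs); alternative decomposition, same cost.

-- ===== PORT A =====
-- A's inner while loop: counts the leading '0' groups of the suffix, returns (count, rest)
def pvCountZeros : List String → Int × List String
  | [] => (0, [])
  | g :: gs => if g = "0" then ((pvCountZeros gs).1 + 1, (pvCountZeros gs).2) else (0, g :: gs)

theorem pvCountZeros_length (l : List String) : (pvCountZeros l).2.length ≤ l.length := by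
  induction l with
  | nil => simp [pvCountZeros]
  | cons g gs ih =>
    simp only [pvCountZeros]
    split
    · simpa using Nat.le_succ_of_le ih
    · simp

-- A's outer while loop, over the remaining suffix, tracking i, max_inicio, max_tamanho
def pvAOuter (l : List String) (i max_inicio max_tamanho : Int) : Int × Int :=
  match l with
  | [] => (max_inicio, max_tamanho)
  | g :: gs =>
    if g = "0" then
      let inicio := i
      let tamanho := (pvCountZeros gs).1 + 1
      if tamanho > max_tamanho ∧ tamanho ≥ 2 then
        pvAOuter (pvCountZeros gs).2 (i + tamanho) inicio tamanho
      else
        pvAOuter (pvCountZeros gs).2 (i + tamanho) max_inicio max_tamanho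
    else
      pvAOuter gs (i + 1) max_inicio max_tamanho
termination_by l.length
decreasing_by
  · exact Nat.lt_succ_of_le (pvCountZeros_length gs)
  · exact Nat.lt_succ_of_le (pvCountZeros_length gs)
  · simp

def encontrar_sequencia_zeros_leftmost (grupos : List String) : Int × Int :=
  pvAOuter grupos 0 (-1) 0

-- ===== PORT B =====
-- one step of B's run-length-encoding loop (acc kept reversed, head = current last run)
def pvRleStep (acc : List (String × Int)) (g : String) : List (String × Int) :=
  match acc with
  | (k, n) :: rest => if k = g then (k, n + 1) :: rest else (g, 1) :: (k, n) :: rest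
  | [] => [(g, 1)]

def pvRuns (grupos : List String) : List (String × Int) :=
  (grupos.foldl pvRleStep []).reverse

-- B's second loop over the runs, threading the running start index
def pvBFold (runs : List (String × Int)) (idx : Int) (best : Int × Int) : Int × Int :=
  match runs with
  | [] => best
  | (k, l) :: rest =>
    let best' := if k = "0" ∧ l ≥ 2 ∧ l > best.2 then (idx, l) else best
    pvBFold rest (idx + l) best'

def encontrar_sequencia_zeros_leftmost_alt (grupos : List String) : Int × Int :=
  pvBFold (pvRuns grupos) 0 (-1, 0)

-- ===== PRECONDITION & SPEC =====
def Spec_encontrar_sequencia_zeros_leftmost (grupos : List String) (out : Int × Int) : Prop := out = encontrar_sequencia_zeros_leftmost_alt grupos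
instance (grupos : List String) (out : Int × Int) : Decidable (Spec_encontrar_sequencia_zeros_leftmost grupos out) := by unfold Spec_encontrar_sequencia_zeros_leftmost; infer_instance

-- ===== CLAIM (what is proved, stated in full; the proofs are below) =====
def Claim_equal_encontrar_sequencia_zeros_leftmost : Prop := ∀ (grupos : List String), Dom_encontrar_sequencia_zeros_leftmost grupos → Spec_encontrar_sequencia_zeros_leftmost grupos (encontrar_sequencia_zeros_leftmost grupos)

-- ===== LEMMAS AND PROOFS =====

-- span of the leading elements equal to g (generalisation of pvCountZeros)
def pvTakeEq (g : String) : List String → Int × List String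
  | [] => (0, [])
  | x :: xs => if x = g then ((pvTakeEq g xs).1 + 1, (pvTakeEq g xs).2) else (0, x :: xs)

theorem pvTakeEq_length (g : String) (l : List String) : (pvTakeEq g l).2.length ≤ l.length := by
  induction l with
  | nil => simp [pvTakeEq]
  | cons x xs ih =>
    simp only [pvTakeEq]
    split
    · simpa using Nat.le_succ_of_le ih
    · simp

theorem pvCountZeros_eq (l : List String) : pvCountZeros l = pvTakeEq "0" l := by
  induction l with
  | nil => rfl
  | cons g gs ih => simp only [pvCountZeros, pvTakeEq, ih]

-- span-based run-length encoding: the bridge between the two ports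
def pvRleS : List String → List (String × Int)
  | [] => []
  | g :: gs => (g, (pvTakeEq g gs).1 + 1) :: pvRleS (pvTakeEq g gs).2
termination_by l => l.length
decreasing_by
  exact Nat.lt_succ_of_le (pvTakeEq_length g gs)

-- merge a pending run onto the front of an encoding
def pvMergeHead (k : String) (m : Int) (rs : List (String × Int)) : List (String × Int) :=
  match rs with
  | [] => [(k, m)]
  | (k', n) :: rest => if k' = k then (k, m + n) :: rest else (k, m) :: (k', n) :: rest

theorem pvMergeHead_rleS (k : String) (m : Int) (gs : List String) :
    pvMergeHead k m (pvRleS gs) = (k, m + (pvTakeEq k gs).1) :: pvRleS (pvTakeEq k gs).2 := by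
  match gs with
  | [] => simp [pvRleS, pvTakeEq, pvMergeHead]
  | x :: xs =>
    by_cases hx : x = k
    · subst hx
      simp only [pvRleS, pvTakeEq, pvMergeHead]
      simp
    · simp only [pvRleS, pvTakeEq, pvMergeHead, hx, if_false]
      simp

theorem pvFoldl_rle (l : List String) (k : String) (n : Int) (rest : List (String × Int)) :
    (List.foldl pvRleStep ((k, n) :: rest) l).reverse =
      rest.reverse ++ pvMergeHead k n (pvRleS l) := by
  induction l generalizing k n rest with
  | nil => simp [pvRleS, pvMergeHead]
  | cons g gs ih =>
    by_cases hk : k = g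
    · subst hk
      have hstep : pvRleStep ((k, n) :: rest) k = (k, n + 1) :: rest := by simp [pvRleStep]
      rw [List.foldl_cons, hstep, ih, pvMergeHead_rleS, pvMergeHead_rleS]
      have h1 : pvTakeEq k (k :: gs) = ((pvTakeEq k gs).1 + 1, (pvTakeEq k gs).2) := by
        simp [pvTakeEq]
      rw [h1]
      have h2 : n + 1 + (pvTakeEq k gs).1 = n + ((pvTakeEq k gs).1 + 1) := by ring
      rw [h2]
    · have hstep : pvRleStep ((k, n) :: rest) g = (g, 1) :: (k, n) :: rest := by
        simp [pvRleStep, hk]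
      rw [List.foldl_cons, hstep, ih, pvMergeHead_rleS, pvMergeHead_rleS]
      have hgk : ¬ (g = k) := fun h => hk h.symm
      have h0 : pvTakeEq k (g :: gs) = (0, g :: gs) := by simp [pvTakeEq, hgk]
      rw [h0]
      simp only [pvRleS]
      simp [add_comm]

theorem pvRuns_eq_rleS (grupos : List String) : pvRuns grupos = pvRleS grupos := by
  cases grupos with
  | nil => simp [pvRuns, pvRleS]
  | cons g gs =>
    unfold pvRuns
    simp only [List.foldl_cons, pvRleStep]
    rw [pvFoldl_rle, pvMergeHead_rleS]
    simp only [pvRleS]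
    simp [add_comm]

theorem pvAOuter_eq_bFold_aux : ∀ (n : Nat) (l : List String), l.length ≤ n →
    ∀ (i m t : Int), pvAOuter l i m t = pvBFold (pvRleS l) i (m, t) := by
  intro n
  induction n with
  | zero =>
    intro l hl i m t
    have : l = [] := List.eq_nil_of_length_eq_zero (Nat.le_zero.mp hl)
    subst this
    simp [pvAOuter, pvRleS, pvBFold]
  | succ n ih =>
    intro l hl i m t
    match l with
    | [] => simp [pvAOuter, pvRleS, pvBFold]
    | g :: gs =>
      have hgs : gs.length ≤ n := by simpa using hl
      by_cases hg : g = "0"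
      · subst hg
        have hr : (pvTakeEq "0" gs).2.length ≤ n := le_trans (pvTakeEq_length _ _) hgs
        simp only [pvAOuter, pvCountZeros_eq, pvRleS, pvBFold]
        split_ifs <;> first
        | exact ih _ hr _ _ _
        | tauto
      · simp only [pvAOuter, if_neg hg, pvRleS, pvBFold]
        rw [if_neg (fun h : g = "0" ∧ _ => hg h.1), ih gs hgs]
        match gs with
        | [] => simp [pvTakeEq, pvRleS, pvBFold]
        | x :: xs =>
          by_cases hx : x = g
          · subst hx
            have h1 : pvTakeEq x (x :: xs) = ((pvTakeEq x xs).1 + 1, (pvTakeEq x xs).2) := by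
              simp [pvTakeEq]
            rw [h1]
            simp only [pvRleS, pvBFold]
            rw [if_neg (fun h : x = "0" ∧ _ => hg h.1)]
            have h2 : i + 1 + ((pvTakeEq x xs).1 + 1) = i + ((pvTakeEq x xs).1 + 1 + 1) := by ring
            rw [h2]
          · have h0 : pvTakeEq g (x :: xs) = (0, x :: xs) := by simp [pvTakeEq, hx]
            rw [h0]
            norm_num

-- ===== VERDICT (by name: the statement is the Claim_ definition above) =====
theorem encontrar_sequencia_zeros_leftmost_spec : Claim_equal_encontrar_sequencia_zeros_leftmost := by
  intro grupos _
  unfold Spec_encontrar_sequencia_zeros_leftmost encontrar_sequencia_zeros_leftmost encontrar_sequencia_zeros_leftmost_alt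
  rw [pvRuns_eq_rleS, pvAOuter_eq_bFold_aux grupos.length grupos le_rfl]
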